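-- pv_equiv track=rewrite | github.com/LYM-Grupo-estrella/P0 | Main.py | limpiador_elemento
-- ===== SOURCE A (Python) =====
-- def limpiador_elemento(elemento) -> str:
--     """Limpia espacios vacios, tabulaciones y saltos de linea.
--     Además formatea para dejar espacios entre cada terminal """
--     elem_limpio = elemento.replace('\n', '').replace('\t', '')
--     elem_limpio = elem_limpio.lower()
--     delimitadores = ['(', ')', ',', ';', '{', '}', '=']
--     for punct in delimitadores:
--         elem_limpio = elem_limpio.replace(punct, f' {punct} ')
--     elem_limpio = ' '.join(elem_limpio.split())
--     return elem_limpio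
-- ===== SOURCE B (Python) =====
-- def limpiador_elemento(elemento) -> str:
--     """One left-to-right scan building tokens directly (words lowercased,
--     delimiters as their own tokens), instead of nine global replace passes."""
--     delimitadores = '(),;{}='
--     tokens = []
--     word = []
--     for ch in elemento:
--         if ch == '\n' or ch == '\t':
--             continue
--         if ch in delimitadores:
--             if word:
--                 tokens.append(''.join(word))
--                 word = []
--             tokens.append(ch)
--         elif ch.isspace():
--             if word:
--                 tokens.append(''.join(word))
--                 word = []
--         else:
--             word.append(ch.lower())
--     if word:
--         tokens.append(''.join(word))
--     return ' '.join(tokens)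
-- ===== Notes on version B (the rewrite author's own statement) =====
-- stated objective: alternative
-- what changed: Replaces A's nine whole-string replace passes plus split/join by a single left-to-right scan that deletes \n/\t, emits delimiters as their own tokens, lowercases and accumulates word characters, and joins the token list once.
import Mathlib
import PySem

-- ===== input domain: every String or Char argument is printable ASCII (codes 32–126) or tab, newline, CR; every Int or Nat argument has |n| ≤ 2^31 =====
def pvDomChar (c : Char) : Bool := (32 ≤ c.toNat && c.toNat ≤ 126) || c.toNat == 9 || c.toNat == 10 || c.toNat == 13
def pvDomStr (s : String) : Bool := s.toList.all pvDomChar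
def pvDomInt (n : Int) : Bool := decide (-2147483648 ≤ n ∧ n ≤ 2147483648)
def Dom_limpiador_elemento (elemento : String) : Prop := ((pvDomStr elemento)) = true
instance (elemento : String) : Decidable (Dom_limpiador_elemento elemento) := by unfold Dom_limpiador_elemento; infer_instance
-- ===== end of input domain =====

-- B replaces A's nine global replace/normalize passes by a single left-to-right scan
-- that builds the tokens directly ('alternative': different algorithm, similar cost).

-- ===== PORT A =====
def limpiador_elemento (elemento : String) : String :=
  let e1 := PySem.Str.replace (PySem.Str.replace elemento "\n" "") "\t" ""
  let e2 := PySem.Str.lower e1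
  let e3 := (["(", ")", ",", ";", "{", "}", "="]).foldl
      (fun s p => PySem.Str.replace s p (" " ++ p ++ " ")) e2
  PySem.Str.join " " (PySem.Str.split₀ e3)

-- ===== PORT B =====
def pvDelims : List Char := ['(', ')', ',', ';', '{', '}', '=']

-- the scan of Source B: `word` is the current word (in order), `toks` the tokens so far
def pvBGo : List Char → List Char → List (List Char) → List (List Char)
  | [], word, toks => if word.isEmpty then toks else toks ++ [word]
  | c :: rest, word, toks =>
    if c = '\n' ∨ c = '\t' then pvBGo rest word toks
    else if c ∈ pvDelims then
      pvBGo rest [] ((if word.isEmpty then toks else toks ++ [word]) ++ [[c]])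
    else if PySem.Chars.isspace c then
      pvBGo rest [] (if word.isEmpty then toks else toks ++ [word])
    else pvBGo rest (word ++ [PySem.Chars.lowerChar c]) toks

def limpiador_elemento_alt (elemento : String) : String :=
  PySem.Str.join " " ((pvBGo elemento.toList [] []).map String.ofList)

-- ===== PRECONDITION & SPEC =====
def Spec_limpiador_elemento (elemento : String) (out : String) : Prop := out = limpiador_elemento_alt elemento
instance (elemento : String) (out : String) : Decidable (Spec_limpiador_elemento elemento out) := by unfold Spec_limpiador_elemento; infer_instance

-- ===== CLAIM (what is proved, stated in full; the proofs are below) =====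
def Claim_equal_limpiador_elemento : Prop := ∀ (elemento : String), Dom_limpiador_elemento elemento → Spec_limpiador_elemento elemento (limpiador_elemento elemento)

-- ===== LEMMAS AND PROOFS =====

-- A's char-level pipeline: the two deleting replaces, lower, and the seven padding replaces
def pvRepDel (c : Char) (s : List Char) : List Char := PySem.Chars.replace s [c] []
def pvRepPad (p : Char) (s : List Char) : List Char := PySem.Chars.replace s [p] [' ', p, ' ']
def pvChain (cs : List Char) : List Char :=
  pvRepPad '=' (pvRepPad '}' (pvRepPad '{' (pvRepPad ';' (pvRepPad ',' (pvRepPad ')' (pvRepPad '('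
    ((pvRepDel '\t' (pvRepDel '\n' cs)).map PySem.Chars.lowerChar)))))))

-- what the whole pipeline emits for one character
def pvFval (c : Char) : List Char :=
  if c = '\n' ∨ c = '\t' then []
  else if c ∈ pvDelims then [' ', c, ' ']
  else [PySem.Chars.lowerChar c]

-- replace with a single-character pattern is a flatMap
theorem pvReplace_single_go (c : Char) (new : List Char) :
    ∀ (s : List Char) (fuel : Nat) (acc : List Char), s.length ≤ fuel →
      PySem.Chars.replace.go [c] new fuel s acc
        = acc.reverse ++ s.flatMap (fun x => if x = c then new else [x]) := by
  intro s
  induction s with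
  | nil => intro fuel acc _; cases fuel <;> simp [PySem.Chars.replace.go]
  | cons x t ih =>
    intro fuel acc hf
    cases fuel with
    | zero => simp at hf
    | succ fuel =>
      by_cases hx : x = c
      · subst hx
        simp [PySem.Chars.replace.go, List.isPrefixOf, ih fuel _ (by simpa using hf)]
      · simp [PySem.Chars.replace.go, List.isPrefixOf, hx, Ne.symm hx,
          ih fuel _ (by simpa using hf)]

theorem pvReplace_single (s : List Char) (c : Char) (new : List Char) :
    PySem.Chars.replace s [c] new = s.flatMap (fun x => if x = c then new else [x]) := by
  simpa [PySem.Chars.replace] using pvReplace_single_go c new s s.length [] le_rfl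

theorem pvChain_append (a b : List Char) : pvChain (a ++ b) = pvChain a ++ pvChain b := by
  simp [pvChain, pvRepPad, pvRepDel, pvReplace_single, List.map_append]

-- per-character facts, checked for every character with code < 127
def pvCharOK (c : Char) : Bool :=
  (pvChain [c] == pvFval c)
  && (PySem.Chars.isspace (PySem.Chars.lowerChar c) == PySem.Chars.isspace c)
  && (!(c ∈ pvDelims : Bool) || !PySem.Chars.isspace c)

set_option maxRecDepth 40000 in
theorem pvCharOK_all : (List.range 127).all (fun n => pvCharOK (Char.ofNat n)) = true := by
  decide

theorem pvCharOK_dom (c : Char) (h : pvDomChar c = true) : pvCharOK c = true := by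
  have hn : c.toNat < 127 := by
    simp [pvDomChar] at h; omega
  have := List.all_eq_true.mp pvCharOK_all c.toNat (by simpa using hn)
  simpa [Char.ofNat_toNat] using this

theorem pvChain_eq (cs : List Char) (h : ∀ c ∈ cs, pvDomChar c = true) :
    pvChain cs = cs.flatMap pvFval := by
  induction cs with
  | nil => decide
  | cons c rest ih =>
    have hc := pvCharOK_dom c (h c (List.mem_cons_self ..))
    simp only [pvCharOK, Bool.and_eq_true, beq_iff_eq] at hc
    calc pvChain (c :: rest) = pvChain ([c] ++ rest) := by simp
      _ = pvChain [c] ++ pvChain rest := pvChain_append [c] rest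
      _ = pvFval c ++ rest.flatMap pvFval := by
            rw [hc.1.1, ih (fun x hx => h x (List.mem_cons_of_mem _ hx))]
      _ = (c :: rest).flatMap pvFval := by simp

-- the split₀ scanner over the pipeline's output is B's scanner over the input
theorem pvInv (cs : List Char) : ∀ (cur : List Char) (acc : List (List Char)),
    (∀ c ∈ cs, pvDomChar c = true) →
    PySem.Chars.split₀.go (cs.flatMap pvFval) cur acc = pvBGo cs cur.reverse acc.reverse := by
  induction cs with
  | nil =>
    intro cur acc _
    by_cases hc : cur.isEmpty <;>
      simp [PySem.Chars.split₀.go, pvBGo, hc, List.isEmpty_reverse]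
  | cons c rest ih =>
    intro cur acc h
    have hc := pvCharOK_dom c (h c (List.mem_cons_self ..))
    simp only [pvCharOK, Bool.and_eq_true, beq_iff_eq, Bool.or_eq_true, Bool.not_eq_true'] at hc
    have hrest : ∀ x ∈ rest, pvDomChar x = true := fun x hx => h x (List.mem_cons_of_mem _ hx)
    by_cases h1 : c = '\n' ∨ c = '\t'
    · simp [pvFval, h1, pvBGo, ih cur acc hrest]
    · by_cases h2 : c ∈ pvDelims
      · have hcs : PySem.Chars.isspace c = false := by
          rcases hc.2 with h' | h'
          · exact absurd (by simpa using h2) (by simpa using h')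
          · simpa using h'
        have hsp : PySem.Chars.isspace ' ' = true := by decide
        by_cases hcur : cur.isEmpty
        · simp [pvFval, h1, h2, PySem.Chars.split₀.go, hsp, hcs, hcur, pvBGo,
            ih [] ([c] :: acc) hrest, List.isEmpty_reverse]
        · simp [pvFval, h1, h2, PySem.Chars.split₀.go, hsp, hcs, hcur, pvBGo,
            ih [] ([c] :: cur.reverse :: acc) hrest, List.isEmpty_reverse]
      · by_cases h3 : PySem.Chars.isspace c
        · have : PySem.Chars.isspace (PySem.Chars.lowerChar c) = true := by rw [hc.1.2, h3]
          by_cases hcur : cur.isEmpty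
          · simp [pvFval, h1, h2, PySem.Chars.split₀.go, this, h3, hcur, pvBGo,
              ih [] acc hrest, List.isEmpty_reverse]
          · simp [pvFval, h1, h2, PySem.Chars.split₀.go, this, h3, hcur, pvBGo,
              ih [] (cur.reverse :: acc) hrest, List.isEmpty_reverse]
        · have : PySem.Chars.isspace (PySem.Chars.lowerChar c) = false := by
            rw [hc.1.2]; simpa using h3
          simp [pvFval, h1, h2, PySem.Chars.split₀.go, this, h3, pvBGo,
            ih (PySem.Chars.lowerChar c :: cur) acc hrest]

-- ===== VERDICT (by name: the statement is the Claim_ definition above) =====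
set_option maxRecDepth 4000 in
theorem limpiador_elemento_spec : Claim_equal_limpiador_elemento := by
  intro elemento hdom
  unfold Spec_limpiador_elemento limpiador_elemento limpiador_elemento_alt
  rw [← String.toList_inj]
  have hdom' : ∀ c ∈ elemento.toList, pvDomChar c = true := by
    have := hdom; unfold Dom_limpiador_elemento pvDomStr at this
    simpa [List.all_eq_true] using this
  have hA : (List.map String.toList (PySem.Str.split₀
      ((["(", ")", ",", ";", "{", "}", "="]).foldl
        (fun s p => PySem.Str.replace s p (" " ++ p ++ " "))
        (PySem.Str.lower (PySem.Str.replace (PySem.Str.replace elemento "\n" "") "\t" "")))))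
      = pvBGo elemento.toList [] [] := by
    rw [PySem.Str.split₀_map_toList]
    have hchain : ((["(", ")", ",", ";", "{", "}", "="]).foldl
        (fun s p => PySem.Str.replace s p (" " ++ p ++ " "))
        (PySem.Str.lower (PySem.Str.replace (PySem.Str.replace elemento "\n" "") "\t" ""))).toList
        = pvChain elemento.toList := by
      simp [List.foldl, PySem.Str.toList_replace, PySem.Str.toList_lower,
        pvChain, pvRepPad, pvRepDel, PySem.Chars.lower]
    rw [hchain, pvChain_eq elemento.toList hdom', PySem.Chars.split₀]
    simpa using pvInv elemento.toList [] [] hdom'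
  have hB : List.map String.toList ((pvBGo elemento.toList [] []).map String.ofList)
      = pvBGo elemento.toList [] [] := by
    simp [List.map_map, Function.comp_def]
  simp only [PySem.Str.toList_join]
  rw [hB, hA]
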